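-- pv_equiv track=rewrite | github.com/Arnold769/Affinity-interview | app.py | map_header_to_fields
-- ===== SOURCE A (Python) =====
-- def map_header_to_fields(headers: list[str]):
--     # Map diverse possible header names to canonical keys
--     header_map = {h.strip().lower(): h for h in headers}
--
--     def find(*candidates):
--         for c in candidates:
--             if c in header_map:
--                 return header_map[c]
--         return None
--
--     customer_id_h = find("customer id", "id", "customer_id", "customerid")
--     first_name_h = find(
--         "customer first name",
--         "first name",
--         "firstname",
--         "name",
--         "first_name",
--     )
--     order_value_h = find(
--         "order value",
--         "orders value",
--         "order amount",
--         "amount",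
--         "total spent",
--         "total_spent",
--         "spent",
--         "spend",
--         "order_value",
--         "ordervalue",
--     )
--
--     return customer_id_h, first_name_h, order_value_h
-- ===== SOURCE B (Python) =====
-- FIELD_CANDIDATES = [
--     ["customer id", "id", "customer_id", "customerid"],
--     ["customer first name", "first name", "firstname", "name", "first_name"],
--     ["order value", "orders value", "order amount", "amount", "total spent",
--      "total_spent", "spent", "spend", "order_value", "ordervalue"],
-- ]
--
--
-- def map_header_to_fields(headers: list[str]):
--     # Single pass over the headers with a priority table: each candidate
--     # spelling is ranked by position in its field's list, and for every field
--     # we keep the header whose normalized spelling has the best (lowest) rank.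
--     # Scanning from the right selects the rightmost occurrence of a spelling.
--     ranks = [{c: i for i, c in enumerate(cands)} for cands in FIELD_CANDIDATES]
--     best = [None, None, None]
--     for h in reversed(headers):
--         key = h.strip().lower()
--         for f, rank in enumerate(ranks):
--             r = rank.get(key)
--             if r is not None and (best[f] is None or r < best[f][0]):
--                 best[f] = (r, h)
--     return tuple(b[1] if b is not None else None for b in best)
-- ===== Notes on version B (the rewrite author's own statement) =====
-- stated objective: alternative
-- what changed: Inverts the traversal: instead of building a normalized-header index and probing it candidate by candidate, B precomputes a candidate-to-priority table per field and makes a single right-to-left pass over the headers, keeping for each field the header whose normalized spelling has the lowest priority rank.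
import Mathlib
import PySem

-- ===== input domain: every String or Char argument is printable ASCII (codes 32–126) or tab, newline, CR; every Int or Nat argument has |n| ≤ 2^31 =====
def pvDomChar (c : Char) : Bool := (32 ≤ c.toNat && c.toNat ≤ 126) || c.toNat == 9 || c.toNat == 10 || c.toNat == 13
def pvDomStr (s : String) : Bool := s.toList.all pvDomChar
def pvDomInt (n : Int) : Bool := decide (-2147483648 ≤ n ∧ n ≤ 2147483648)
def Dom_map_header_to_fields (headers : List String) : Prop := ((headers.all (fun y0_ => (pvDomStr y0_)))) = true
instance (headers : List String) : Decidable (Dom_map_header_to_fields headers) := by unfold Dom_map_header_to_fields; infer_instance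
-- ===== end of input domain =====

-- B inverts A's traversal: a candidate-to-priority table per field and one
-- right-to-left pass over the headers keeping the lowest-rank match (alternative).

-- ===== PORT A =====
-- header_map = {h.strip().lower(): h for h in headers}
def pvHeaderMap (headers : List String) : PySem.Dict String String :=
  headers.foldl (fun d h => d.insert (PySem.Str.lower (PySem.Str.strip h)) h) PySem.Dict.empty

-- def find(*candidates): for c in candidates: if c in header_map: return header_map[c]; return None
def pvFindA (d : PySem.Dict String String) : List String → Option String
  | [] => none
  | c :: rest => if d.contains c then d.get? c else pvFindA d rest

def map_header_to_fields (headers : List String) : Option String × Option String × Option String :=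
  let headerMap := pvHeaderMap headers
  let customer_id_h := pvFindA headerMap ["customer id", "id", "customer_id", "customerid"]
  let first_name_h := pvFindA headerMap
    ["customer first name", "first name", "firstname", "name", "first_name"]
  let order_value_h := pvFindA headerMap
    ["order value", "orders value", "order amount", "amount", "total spent",
     "total_spent", "spent", "spend", "order_value", "ordervalue"]
  (customer_id_h, first_name_h, order_value_h)

-- ===== PORT B =====
def pvCands1 : List String := ["customer id", "id", "customer_id", "customerid"]
def pvCands2 : List String :=
  ["customer first name", "first name", "firstname", "name", "first_name"]
def pvCands3 : List String :=
  ["order value", "orders value", "order amount", "amount", "total spent",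
   "total_spent", "spent", "spend", "order_value", "ordervalue"]

-- {c: i for i, c in enumerate(cands)}
def pvRank (cands : List String) : PySem.Dict String Int :=
  (PySem.List.enumerate cands).foldl (fun d p => d.insert p.2 p.1) PySem.Dict.empty

-- r = rank.get(key); if r is not None and (best[f] is None or r < best[f][0]): best[f] = (r, h)
def pvStep (rank : PySem.Dict String Int) (b : Option (Int × String)) (key h : String) :
    Option (Int × String) :=
  match rank.get? key with
  | none => b
  | some r =>
    match b with
    | none => some (r, h)
    | some (rb, _) => if r < rb then some (r, h) else b

def map_header_to_fields_alt (headers : List String) : Option String × Option String × Option String :=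
  let r1 := pvRank pvCands1
  let r2 := pvRank pvCands2
  let r3 := pvRank pvCands3
  let best := headers.reverse.foldl
    (fun (b : Option (Int × String) × Option (Int × String) × Option (Int × String)) h =>
      let key := PySem.Str.lower (PySem.Str.strip h)
      (pvStep r1 b.1 key h, pvStep r2 b.2.1 key h, pvStep r3 b.2.2 key h))
    (none, none, none)
  (best.1.map Prod.snd, best.2.1.map Prod.snd, best.2.2.map Prod.snd)

-- ===== PRECONDITION & SPEC =====
def Spec_map_header_to_fields (headers : List String) (out : Option String × Option String × Option String) : Prop := out = map_header_to_fields_alt headers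
instance (headers : List String) (out : Option String × Option String × Option String) : Decidable (Spec_map_header_to_fields headers out) := by unfold Spec_map_header_to_fields; infer_instance

-- ===== CLAIM (what is proved, stated in full; the proofs are below) =====
def Claim_equal_map_header_to_fields : Prop := ∀ (headers : List String), Dom_map_header_to_fields headers → Spec_map_header_to_fields headers (map_header_to_fields headers)

-- ===== LEMMAS AND PROOFS =====

def pvNorm (h : String) : String := PySem.Str.lower (PySem.Str.strip h)

-- last header (in original order) whose normalized form equals c
def pvLastMatch (headers : List String) (c : String) : Option String :=
  headers.foldl (fun best h => if c = pvNorm h then some h else best) none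

-- first candidate with a match, returning the last matching header
def pvFirstLast (headers : List String) : List String → Option String
  | [] => none
  | c :: rest =>
    match pvLastMatch headers c with
    | some h => some h
    | none => pvFirstLast headers rest

-- first index (from offset n) of key k in a candidate list
def pvFIdx (n : Int) (k : String) : List String → Option Int
  | [] => none
  | c :: cs => if k = c then some n else pvFIdx (n + 1) k cs

-- index-carrying version of pvFirstLast
def pvBestAux (t : List String) (i : Int) : List String → Option (Int × String)
  | [] => none
  | c :: cs =>
    match pvLastMatch t c with
    | some h => some (i, h)
    | none => pvBestAux t (i + 1) cs

-- pvStep with the rank dict replaced by the first-index function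
def pvStepI (i : Int) (cs : List String) (b : Option (Int × String)) (key h : String) :
    Option (Int × String) :=
  match pvFIdx i key cs with
  | none => b
  | some r =>
    match b with
    | none => some (r, h)
    | some (rb, _) => if r < rb then some (r, h) else b

theorem pv_get?_foldl_insert (ps : List (Int × String)) (d : PySem.Dict String Int) (k : String) :
    (ps.foldl (fun d p => d.insert p.2 p.1) d).get? k =
      ps.foldl (fun acc p => if k = p.2 then some p.1 else acc) (d.get? k) := by
  induction ps generalizing d with
  | nil => rfl
  | cons p t ih => simp only [List.foldl_cons, ih, PySem.Dict.get?_insert]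

theorem pv_lastFold_const (cs : List String) (n : Int) (k : String) (s : Option Int)
    (hk : k ∉ cs) :
    (PySem.List.enumerate cs n).foldl (fun acc p => if k = p.2 then some p.1 else acc) s = s := by
  induction cs generalizing n s with
  | nil => rfl
  | cons c t ih =>
    simp only [PySem.List.enumerate_cons, List.foldl_cons]
    rw [if_neg (by intro h; exact hk (h ▸ List.mem_cons_self))]
    exact ih _ _ (fun h => hk (List.mem_cons_of_mem _ h))

theorem pv_lastFold_enum (cs : List String) (n : Int) (k : String) (hnd : cs.Nodup) :
    (PySem.List.enumerate cs n).foldl (fun acc p => if k = p.2 then some p.1 else acc) none =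
      pvFIdx n k cs := by
  induction cs generalizing n with
  | nil => rfl
  | cons c t ih =>
    simp only [PySem.List.enumerate_cons, List.foldl_cons, pvFIdx]
    by_cases hkc : k = c
    · rw [if_pos hkc, if_pos hkc]
      exact pv_lastFold_const t (n + 1) k _ (by subst hkc; exact (List.nodup_cons.mp hnd).1)
    · rw [if_neg hkc, if_neg hkc]
      exact ih (n + 1) (List.nodup_cons.mp hnd).2

theorem pv_rank_get (cs : List String) (hnd : cs.Nodup) (k : String) :
    (pvRank cs).get? k = pvFIdx 0 k cs := by
  rw [pvRank, pv_get?_foldl_insert, PySem.Dict.get?_empty, pv_lastFold_enum cs 0 k hnd]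

theorem pvFIdx_ge (cs : List String) (n r : Int) (k : String) (h : pvFIdx n k cs = some r) :
    n ≤ r := by
  induction cs generalizing n with
  | nil => simp [pvFIdx] at h
  | cons c t ih =>
    simp only [pvFIdx] at h
    split_ifs at h with hc
    · injection h with h'; omega
    · have := ih (n + 1) h; omega

theorem pvBestAux_ge (cs t : List String) (i r : Int) (x : String)
    (h : pvBestAux t i cs = some (r, x)) : i ≤ r := by
  induction cs generalizing i with
  | nil => simp [pvBestAux] at h
  | cons c cs' ih =>
    simp only [pvBestAux] at h
    cases hm : pvLastMatch t c with
    | some y => rw [hm] at h; simp at h; omega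
    | none => rw [hm] at h; have := ih (i + 1) h; omega

theorem pv_fold_from_state (t : List String) (c : String) (s : Option String) :
    t.foldl (fun best h => if c = pvNorm h then some h else best) s =
      match pvLastMatch t c with
      | none => s
      | some x => some x := by
  induction t generalizing s with
  | nil => rfl
  | cons h t ih =>
    simp only [pvLastMatch, List.foldl_cons] at *
    rw [ih, ih (if c = pvNorm h then some h else none)]
    cases t.foldl (fun best h => if c = pvNorm h then some h else best) none <;>
      by_cases hc : c = pvNorm h <;> simp [hc]

theorem pvLastMatch_cons (h : String) (t : List String) (c : String) :
    pvLastMatch (h :: t) c =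
      match pvLastMatch t c with
      | none => if c = pvNorm h then some h else none
      | some x => some x := by
  simp only [pvLastMatch, List.foldl_cons]
  exact pv_fold_from_state t c _

theorem pvBestAux_nil (cs : List String) (i : Int) : pvBestAux [] i cs = none := by
  induction cs generalizing i with
  | nil => rfl
  | cons c cs' ih => simp [pvBestAux, pvLastMatch, ih]

theorem pvStep_cons (cs : List String) (i : Int) (t : List String) (h : String) :
    pvStepI i cs (pvBestAux t i cs) (pvNorm h) h = pvBestAux (h :: t) i cs := by
  induction cs generalizing i with
  | nil => rfl
  | cons c cs' ih =>
    simp only [pvStepI, pvFIdx, pvBestAux, pvLastMatch_cons]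
    by_cases hkc : pvNorm h = c
    · simp only [if_pos hkc, if_pos hkc.symm]
      cases hm : pvLastMatch t c with
      | some x => simp
      | none =>
        cases hb : pvBestAux t (i + 1) cs' with
        | none => simp
        | some p =>
          obtain ⟨rb, xb⟩ := p
          have := pvBestAux_ge cs' t (i + 1) rb xb hb
          simp [show i < rb by omega]
    · simp only [if_neg hkc, if_neg (fun hc : c = pvNorm h => hkc hc.symm)]
      cases hm : pvLastMatch t c with
      | some x =>
        cases hf : pvFIdx (i + 1) (pvNorm h) cs' with
        | none => simp
        | some r =>
          have := pvFIdx_ge cs' (i + 1) r (pvNorm h) hf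
          simp [show ¬ (r < i) by omega]
      | none =>
        exact ih (i + 1)

theorem pv_main (cs t : List String) :
    t.foldr (fun h b => pvStepI 0 cs b (pvNorm h) h) none = pvBestAux t 0 cs := by
  induction t with
  | nil => exact (pvBestAux_nil cs 0).symm
  | cons h t ih => rw [List.foldr_cons, ih, pvStep_cons]

theorem pvBestAux_map_snd (cs t : List String) (i : Int) :
    (pvBestAux t i cs).map Prod.snd = pvFirstLast t cs := by
  induction cs generalizing i with
  | nil => rfl
  | cons c cs' ih =>
    simp only [pvBestAux, pvFirstLast]
    cases pvLastMatch t c with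
    | some x => rfl
    | none => exact ih (i + 1)

theorem pvStep_eq_stepI (cs : List String) (hnd : cs.Nodup) (b : Option (Int × String))
    (key h : String) : pvStep (pvRank cs) b key h = pvStepI 0 cs b key h := by
  simp only [pvStep, pvStepI, pv_rank_get cs hnd]

theorem pv_field (headers cs : List String) (hnd : cs.Nodup) :
    (headers.reverse.foldl (fun b h => pvStep (pvRank cs) b (pvNorm h) h) none).map Prod.snd =
      pvFirstLast headers cs := by
  rw [List.foldl_reverse]
  have hfun : (fun (h : String) (b : Option (Int × String)) => pvStep (pvRank cs) b (pvNorm h) h)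
      = fun h b => pvStepI 0 cs b (pvNorm h) h := by
    funext h b; exact pvStep_eq_stepI cs hnd b (pvNorm h) h
  rw [hfun, pv_main, pvBestAux_map_snd]

theorem pv_triple_split {α β γ δ : Type} (f1 : β → α → β) (f2 : γ → α → γ) (f3 : δ → α → δ)
    (l : List α) (a : β) (b : γ) (c : δ) :
    l.foldl (fun (s : β × γ × δ) h => (f1 s.1 h, f2 s.2.1 h, f3 s.2.2 h)) (a, b, c) =
      (l.foldl f1 a, l.foldl f2 b, l.foldl f3 c) := by
  induction l generalizing a b c with
  | nil => rfl
  | cons x t ih => simp only [List.foldl_cons, ih]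

-- A-side: lookup in the insert loop's dict = last-match fold over the list
theorem pv_get?_headerMap_aux (headers : List String) (c : String) (d : PySem.Dict String String) :
    (headers.foldl (fun d h => d.insert (PySem.Str.lower (PySem.Str.strip h)) h) d).get? c =
      headers.foldl (fun best h => if c = pvNorm h then some h else best) (d.get? c) := by
  induction headers generalizing d with
  | nil => rfl
  | cons h t ih =>
    simp only [List.foldl_cons, ih, PySem.Dict.get?_insert, pvNorm]
    rfl

theorem pv_get?_headerMap (headers : List String) (c : String) :
    (pvHeaderMap headers).get? c = pvLastMatch headers c := by
  simpa [pvHeaderMap, pvLastMatch, PySem.Dict.get?_empty] using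
    pv_get?_headerMap_aux headers c PySem.Dict.empty

theorem pv_findA_eq (headers : List String) (cs : List String) :
    pvFindA (pvHeaderMap headers) cs = pvFirstLast headers cs := by
  induction cs with
  | nil => rfl
  | cons c rest ih =>
    simp only [pvFindA, pvFirstLast, ih, PySem.Dict.contains_eq_isSome_get?, pv_get?_headerMap]
    cases pvLastMatch headers c <;> simp

theorem pv_alt_eq (headers : List String) :
    map_header_to_fields_alt headers =
      (pvFirstLast headers pvCands1, pvFirstLast headers pvCands2,
        pvFirstLast headers pvCands3) := by
  unfold map_header_to_fields_alt
  simp only []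
  rw [pv_triple_split
      (fun b h => pvStep (pvRank pvCands1) b (PySem.Str.lower (PySem.Str.strip h)) h)
      (fun b h => pvStep (pvRank pvCands2) b (PySem.Str.lower (PySem.Str.strip h)) h)
      (fun b h => pvStep (pvRank pvCands3) b (PySem.Str.lower (PySem.Str.strip h)) h)]
  exact Prod.ext (pv_field headers pvCands1 (by decide))
    (Prod.ext (pv_field headers pvCands2 (by decide)) (pv_field headers pvCands3 (by decide)))

-- ===== VERDICT (by name: the statement is the Claim_ definition above) =====
theorem map_header_to_fields_spec : Claim_equal_map_header_to_fields := by
  intro headers _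
  unfold Spec_map_header_to_fields map_header_to_fields
  rw [pv_alt_eq]
  simp only [pv_findA_eq]
  rfl
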